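-- pv_equiv track=rewrite | github.com/yangjung-woo/KT-Workspace | KT_coding_masters/2차 코딩마스터즈/high3.py | card_shuffle
-- ===== SOURCE A (Python) =====
-- def card_shuffle(N, K, A):
--
--     cards = list(range(1, N + 1))
--     def apply_permutation(cards, A):
--         return [cards[A[i] - 1] for i in range(N)]
--
--     visited = [False] * N
--     cycles = []
--
--     for i in range(N):
--         if not visited[i]:
--             cycle = []
--             current = i
--             while not visited[current]:
--                 visited[current] = True
--                 cycle.append(current)
--                 current = A[current] - 1
--             cycles.append(cycle)
--
--     # K번 섞은 결과 계산
--     result = [0] * N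
--     for cycle in cycles:
--         cycle_length = len(cycle)
--         shift = K % cycle_length
--         for i in range(cycle_length):
--             result[cycle[(i + shift) % cycle_length]] = cards[cycle[i]]
--
--     return result
-- ===== SOURCE B (Python) =====
-- def card_shuffle(N, K, A):
--     # One-step map in 0-based terms: card i+1 moves to position f[i].
--     f = [A[i] - 1 for i in range(N)]
--     # acc = f composed with itself e times, by binary exponentiation.
--     e = K if K >= 0 else -K
--     acc = list(range(N))
--     base = f
--     while e > 0:
--         if e & 1:
--             acc = [base[acc[i]] for i in range(N)]
--         base = [base[base[i]] for i in range(N)]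
--         e >>= 1
--     if K >= 0:
--         # shuffling forward K times: card i+1 ends at position acc[i]
--         result = [0] * N
--         for i in range(N):
--             result[acc[i]] = i + 1
--         return result
--     else:
--         # shuffling backward |K| times: position j receives card acc[j]+1
--         return [x + 1 for x in acc]
-- ===== Notes on version B (the rewrite author's own statement) =====
-- stated objective: alternative
-- what changed: Replaces the visited-array cycle decomposition with per-cycle modular rotation by binary exponentiation of the one-step scatter permutation (square-and-multiply over composition, then one scatter for K>=0 or one gather for K<0).
-- outside the precondition, e.g. on card_shuffle(2, 1, [1, 1]): A returns [1, 2], B returns [2, 0]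
import Mathlib
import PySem

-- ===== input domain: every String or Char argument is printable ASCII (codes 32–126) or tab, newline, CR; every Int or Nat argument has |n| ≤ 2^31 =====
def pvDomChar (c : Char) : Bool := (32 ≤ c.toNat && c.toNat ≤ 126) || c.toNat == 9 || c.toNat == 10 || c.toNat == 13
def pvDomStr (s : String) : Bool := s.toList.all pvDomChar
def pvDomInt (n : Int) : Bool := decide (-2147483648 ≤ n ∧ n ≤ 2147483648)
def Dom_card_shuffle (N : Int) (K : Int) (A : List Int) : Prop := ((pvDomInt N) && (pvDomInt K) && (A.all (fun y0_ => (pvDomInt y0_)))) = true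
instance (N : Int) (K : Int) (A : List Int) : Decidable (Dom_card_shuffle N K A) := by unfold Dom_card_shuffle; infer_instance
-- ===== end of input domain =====

-- B replaces A's visited-array cycle decomposition (with per-cycle modular rotation) by binary
-- exponentiation of the one-step permutation followed by one scatter (K ≥ 0) or gather (K < 0);
-- objective: a genuinely different algorithm of similar cost.

-- ===== PORT A =====
-- the inner `while not visited[current]` loop; fuel bounds the iteration count (each
-- iteration flips one visited entry, so `visited.length + 1` steps always suffice);
-- `none` from pyGet? is where Python raises IndexError (excluded by Pre_)
def pvCsWalk (A : List Int) (visited : List Bool) (cycle : List Int) (current : Int) :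
    Nat → List Bool × List Int
  | 0 => (visited, cycle)
  | fuel + 1 =>
    match PySem.List.pyGet? visited current with
    | none => (visited, cycle)
    | some b =>
      if b then (visited, cycle)
      else pvCsWalk A (PySem.List.pySetD visited current true) (cycle ++ [current])
             (PySem.List.pyGetD A current 0 - 1) fuel

-- the `for i in range(N)` loop building (visited, cycles)
def pvCsCycles (N : Int) (A : List Int) : List Bool × List (List Int) :=
  (PySem.List.pyRange 0 N 1).foldl
    (fun st i =>
      if PySem.List.pyGetD st.1 i false then st
      else
        let w := pvCsWalk A st.1 [] i (st.1.length + 1)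
        (w.1, st.2 ++ [w.2]))
    (List.replicate N.toNat false, [])

def card_shuffle (N : Int) (K : Int) (A : List Int) : List Int :=
  let cards := PySem.List.pyRange 1 (N + 1) 1
  (pvCsCycles N A).2.foldl
    (fun result cycle =>
      let L : Int := cycle.length
      let shift := PySem.Int.mod K L
      (PySem.List.pyRange 0 L 1).foldl
        (fun result i =>
          PySem.List.pySetD result
            (PySem.List.pyGetD cycle (PySem.Int.mod (i + shift) L) 0)
            (PySem.List.pyGetD cards (PySem.List.pyGetD cycle i 0) 0))
        result)
    (List.replicate N.toNat 0)

-- ===== PORT B =====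
-- `while e > 0: if e & 1: acc = base∘acc; base = base∘base; e >>= 1`
def pvCsPow (N : Int) (acc base : List Int) (e : Nat) : List Int :=
  if e = 0 then acc
  else
    let acc' := if e % 2 = 1 then
        (PySem.List.pyRange 0 N 1).map
          (fun i => PySem.List.pyGetD base (PySem.List.pyGetD acc i 0) 0)
      else acc
    let base' := (PySem.List.pyRange 0 N 1).map
        (fun i => PySem.List.pyGetD base (PySem.List.pyGetD base i 0) 0)
    pvCsPow N acc' base' (e / 2)
  termination_by e
  decreasing_by exact Nat.div_lt_self (Nat.pos_of_ne_zero (by assumption)) (by omega)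

def card_shuffle_alt (N : Int) (K : Int) (A : List Int) : List Int :=
  let f := (PySem.List.pyRange 0 N 1).map (fun i => PySem.List.pyGetD A i 0 - 1)
  let e : Nat := (if 0 ≤ K then K else -K).toNat
  let acc := pvCsPow N (PySem.List.pyRange 0 N 1) f e
  if 0 ≤ K then
    (PySem.List.pyRange 0 N 1).foldl
      (fun result i => PySem.List.pySetD result (PySem.List.pyGetD acc i 0) (i + 1))
      (List.replicate N.toNat 0)
  else
    acc.map (fun x => x + 1)

-- ===== PRECONDITION & SPEC =====
-- Pre_ is the function's natural domain: either N ≤ 0 (both programs return []) or the first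
-- N entries of A form a permutation of 1..N. Outside it A either raises (IndexError on
-- out-of-range indices) or, via Python's negative-index wraparound and visited-list aliasing
-- on duplicate values, returns values that are accidents of A's implementation.
def Pre_card_shuffle (N : Int) (K : Int) (A : List Int) : Prop :=
  N ≤ 0 ∨ (0 < N ∧ N.toNat ≤ A.length ∧ (A.take N.toNat).Nodup ∧
    ∀ v ∈ A.take N.toNat, 1 ≤ v ∧ v ≤ N)
instance (N : Int) (K : Int) (A : List Int) : Decidable (Pre_card_shuffle N K A) := by
  unfold Pre_card_shuffle; infer_instance

def pvWitness_card_shuffle : Int × Int × List Int := (3, 5, [2, 3, 1])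

def Spec_card_shuffle (N : Int) (K : Int) (A : List Int) (out : List Int) : Prop :=
  out = card_shuffle_alt N K A
instance (N : Int) (K : Int) (A : List Int) (out : List Int) :
    Decidable (Spec_card_shuffle N K A out) := by unfold Spec_card_shuffle; infer_instance

-- ===== CLAIM (what is proved, stated in full; the proofs are below) =====
def Claim_equal_card_shuffle : Prop :=
  ∀ (N : Int) (K : Int) (A : List Int), Dom_card_shuffle N K A → Pre_card_shuffle N K A →
    Spec_card_shuffle N K A (card_shuffle N K A)

-- ===== LEMMAS AND PROOFS =====

-- the 0-based one-step map: card at position x moves next to position pvF A x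
def pvF (A : List Int) (x : ℕ) : ℕ := (PySem.List.pyGetD A (x : Int) 0 - 1).toNat

-- usable form of Pre_: pvF maps [0,n) into [0,n) injectively and A's entries are pvF+1
def pvGood (n : ℕ) (A : List Int) : Prop :=
  (∀ x < n, pvF A x < n ∧ PySem.List.pyGetD A (x : Int) 0 = (pvF A x : Int) + 1) ∧
  (∀ x < n, ∀ y < n, pvF A x = pvF A y → x = y)

-- minimal positive period of x under f (proof-side only)
noncomputable def pvPd (f : ℕ → ℕ) (x : ℕ) : ℕ := sInf {L | 0 < L ∧ f^[L] x = x}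

-- the common value both programs put at position j, minus one
noncomputable def pvG (f : ℕ → ℕ) (K : Int) (j : ℕ) : ℕ :=
  f^[((-K) % (pvPd f j : Int)).toNat] j

lemma pvPreGood {N : Int} {A : List Int} (hlen : N.toNat ≤ A.length)
    (hnd : (A.take N.toNat).Nodup) (hv : ∀ v ∈ A.take N.toNat, 1 ≤ v ∧ v ≤ N) :
    pvGood N.toNat A := by
  have key : ∀ x (hx : x < N.toNat), PySem.List.pyGetD A (x : Int) 0 = A[x]'(by omega) ∧
      1 ≤ A[x]'(by omega) ∧ A[x]'(by omega) ≤ N := by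
    intro x hx
    have hxl : x < A.length := by omega
    have h1 : PySem.List.pyGetD A (x : Int) 0 = A[x] := by
      simp [PySem.List.pyGetD_natCast, List.getD_eq_getElem?_getD, List.getElem?_eq_getElem hxl]
    have hmem : A[x] ∈ A.take N.toNat := by
      have : (A.take N.toNat)[x]'(by simp; omega) = A[x] := List.getElem_take
      rw [← this]; exact List.getElem_mem _
    exact ⟨h1, (hv _ hmem).1, (hv _ hmem).2⟩
  constructor
  · intro x hx
    obtain ⟨h1, h2, h3⟩ := key x hx
    unfold pvF
    rw [h1]
    constructor
    · omega
    · omega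
  · intro x hx y hy hf
    obtain ⟨h1, h2, h3⟩ := key x hx
    obtain ⟨h1', h2', h3'⟩ := key y hy
    unfold pvF at hf
    rw [h1] at hf; rw [h1'] at hf
    have hAxy : A[x]'(by omega) = A[y]'(by omega) := by omega
    have hx' : x < (A.take N.toNat).length := by simp; omega
    have hy' : y < (A.take N.toNat).length := by simp; omega
    have : (A.take N.toNat)[x]'hx' = (A.take N.toNat)[y]'hy' := by
      rw [List.getElem_take, List.getElem_take]; exact hAxy
    exact (List.Nodup.getElem_inj_iff hnd).mp this

lemma pvIterLt {f : ℕ → ℕ} {n : ℕ} (hm : ∀ x < n, f x < n) {x : ℕ} (hx : x < n) (k : ℕ) :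
    f^[k] x < n := by
  induction k with
  | zero => simpa
  | succ k ih => rw [Function.iterate_succ_apply']; exact hm _ ih

lemma pvIterCancel {f : ℕ → ℕ} {n : ℕ} (hm : ∀ x < n, f x < n)
    (hi : ∀ x < n, ∀ y < n, f x = f y → x = y) {x y : ℕ} (hx : x < n) (hy : y < n)
    (k : ℕ) (h : f^[k] x = f^[k] y) : x = y := by
  induction k with
  | zero => simpa using h
  | succ k ih =>
      rw [Function.iterate_succ_apply', Function.iterate_succ_apply'] at h
      exact ih (hi _ (pvIterLt hm hx k) _ (pvIterLt hm hy k) h)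

lemma pvPdEx {f : ℕ → ℕ} {n : ℕ} (hm : ∀ x < n, f x < n)
    (hi : ∀ x < n, ∀ y < n, f x = f y → x = y) {x : ℕ} (hx : x < n) :
    ∃ L, (0 < L ∧ f^[L] x = x) ∧ L ≤ n := by
  obtain ⟨a, ha, b, hb, hne, heq⟩ :=
    Finset.exists_ne_map_eq_of_card_lt_of_maps_to (s := Finset.range (n + 1))
      (t := Finset.range n) (by simp)
      (fun k _ => Finset.mem_range.mpr (pvIterLt hm hx k))
  simp only [Finset.mem_range] at ha hb
  rcases Nat.lt_or_ge a b with h | h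
  · refine ⟨b - a, ⟨by omega, ?_⟩, by omega⟩
    apply pvIterCancel hm hi (pvIterLt hm hx _) hx a
    rw [← Function.iterate_add_apply]
    rw [show a + (b - a) = b by omega]
    exact heq.symm
  · have hab : b < a := by omega
    refine ⟨a - b, ⟨by omega, ?_⟩, by omega⟩
    apply pvIterCancel hm hi (pvIterLt hm hx _) hx b
    rw [← Function.iterate_add_apply]
    rw [show b + (a - b) = a by omega]
    exact heq

lemma pvPdSpec {f : ℕ → ℕ} {n : ℕ} (hm : ∀ x < n, f x < n)
    (hi : ∀ x < n, ∀ y < n, f x = f y → x = y) {x : ℕ} (hx : x < n) :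
    0 < pvPd f x ∧ f^[pvPd f x] x = x ∧ pvPd f x ≤ n := by
  obtain ⟨L, hL, hLn⟩ := pvPdEx hm hi hx
  have hmem : pvPd f x ∈ {L | 0 < L ∧ f^[L] x = x} := Nat.sInf_mem ⟨L, hL⟩
  exact ⟨hmem.1, hmem.2, le_trans (Nat.sInf_le hL) hLn⟩

lemma pvPdLe {f : ℕ → ℕ} {L x : ℕ} (h0 : 0 < L) (h : f^[L] x = x) : pvPd f x ≤ L :=
  Nat.sInf_le ⟨h0, h⟩

lemma pvPdDvd {f : ℕ → ℕ} {n : ℕ} (hm : ∀ x < n, f x < n)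
    (hi : ∀ x < n, ∀ y < n, f x = f y → x = y) {x : ℕ} (hx : x < n) (L : ℕ) :
    f^[L] x = x ↔ pvPd f x ∣ L := by
  obtain ⟨hpos, hfix, -⟩ := pvPdSpec hm hi hx
  have hmul : ∀ q, f^[pvPd f x * q] x = x := by
    intro q
    induction q with
    | zero => simp
    | succ q ih =>
        rw [Nat.mul_succ, Function.iterate_add_apply, hfix, ih]
  constructor
  · intro hL
    by_contra hnd
    have hr : L % pvPd f x ≠ 0 := fun h => hnd (Nat.dvd_iff_mod_eq_zero.mpr h)
    have hfr : f^[L % pvPd f x] x = x := by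
      have : f^[L % pvPd f x + pvPd f x * (L / pvPd f x)] x = x := by
        rw [Nat.mod_add_div]
        exact hL
      rwa [Function.iterate_add_apply, hmul] at this
    have hA := pvPdLe (Nat.pos_of_ne_zero hr) hfr
    have hB := Nat.mod_lt L hpos
    omega
  · rintro ⟨q, rfl⟩
    exact hmul q

lemma pvIterMod {f : ℕ → ℕ} {n : ℕ} (hm : ∀ x < n, f x < n)
    (hi : ∀ x < n, ∀ y < n, f x = f y → x = y) {x : ℕ} (hx : x < n) (k : ℕ) :
    f^[k] x = f^[k % pvPd f x] x := by
  have hdvd : pvPd f x ∣ pvPd f x * (k / pvPd f x) := ⟨_, rfl⟩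
  have hfix := (pvPdDvd hm hi hx _).mpr hdvd
  calc f^[k] x = f^[k % pvPd f x + pvPd f x * (k / pvPd f x)] x := by
        rw [Nat.mod_add_div]
    _ = f^[k % pvPd f x] x := by rw [Function.iterate_add_apply, hfix]

lemma pvIterInjLt {f : ℕ → ℕ} {n : ℕ} (hm : ∀ x < n, f x < n)
    (hi : ∀ x < n, ∀ y < n, f x = f y → x = y) {x : ℕ} (hx : x < n) {a b : ℕ}
    (ha : a < pvPd f x) (hb : b < pvPd f x) (h : f^[a] x = f^[b] x) : a = b := by
  have main : ∀ a b : ℕ, a ≤ b → b < pvPd f x → f^[a] x = f^[b] x → a = b := by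
    intro a b hab hbp heq
    have : f^[b - a] x = x := by
      apply pvIterCancel hm hi (pvIterLt hm hx _) hx a
      rw [← Function.iterate_add_apply, show a + (b - a) = b by omega]
      exact heq.symm
    rcases Nat.eq_zero_or_pos (b - a) with h0 | h0
    · omega
    · have := pvPdLe h0 this
      omega
  rcases Nat.lt_or_ge a b with hab | hab
  · exact main a b (by omega) hb h
  · exact (main b a hab ha h.symm).symm

lemma pvPdIter {f : ℕ → ℕ} {n : ℕ} (hm : ∀ x < n, f x < n)
    (hi : ∀ x < n, ∀ y < n, f x = f y → x = y) {x : ℕ} (hx : x < n) (t : ℕ) :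
    pvPd f (f^[t] x) = pvPd f x := by
  have hy : f^[t] x < n := pvIterLt hm hx t
  obtain ⟨hpx, hfx, -⟩ := pvPdSpec hm hi hx
  obtain ⟨hpy, hfy, -⟩ := pvPdSpec hm hi hy
  apply Nat.dvd_antisymm
  · apply (pvPdDvd hm hi hy _).mp
    rw [← Function.iterate_add_apply, Nat.add_comm, Function.iterate_add_apply, hfx]
  · apply (pvPdDvd hm hi hx _).mp
    apply pvIterCancel hm hi (pvIterLt hm hx _) hx t
    rw [← Function.iterate_add_apply, Nat.add_comm, Function.iterate_add_apply]
    exact hfy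

-- getD after set
lemma pvGetDSetG {α : Type} {l : List α} {i : ℕ} (hi : i < l.length) (v d : α) (j : ℕ) :
    (l.set i v).getD j d = if j = i then v else l.getD j d := by
  by_cases h : j = i
  · subst h
    simp [List.getD_eq_getElem?_getD, hi]
  · have h' : i ≠ j := fun e => h e.symm
    rw [List.getD_eq_getElem?_getD, List.getD_eq_getElem?_getD, List.getElem?_set_ne h', if_neg h]

lemma pvGetDSet {l : List Int} {i : ℕ} (hi : i < l.length) (v : Int) (j : ℕ) :
    (l.set i v).getD j 0 = if j = i then v else l.getD j 0 := by
  by_cases h : j = i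
  · subst h
    simp [List.getD_eq_getElem?_getD, List.getElem?_set_self', hi]
  · have h' : i ≠ j := fun e => h e.symm
    rw [List.getD_eq_getElem?_getD, List.getD_eq_getElem?_getD, List.getElem?_set_ne h', if_neg h]

-- generic scatter loop: writing v t at pairwise-distinct positions p t
lemma pvScatter (p : ℕ → ℕ) (v : ℕ → Int) (M : ℕ) (r : List Int)
    (hp : ∀ t < M, p t < r.length) (hinj : ∀ a < M, ∀ b < M, p a = p b → a = b) :
    ((List.range M).foldl (fun r t => r.set (p t) (v t)) r).length = r.length ∧
    (∀ t < M, ((List.range M).foldl (fun r t => r.set (p t) (v t)) r).getD (p t) 0 = v t) ∧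
    (∀ j : ℕ, (∀ t < M, p t ≠ j) →
      ((List.range M).foldl (fun r t => r.set (p t) (v t)) r).getD j 0 = r.getD j 0) := by
  induction M with
  | zero => simp
  | succ M ih =>
      obtain ⟨ihl, ihhit, ihmiss⟩ := ih (fun t ht => hp t (by omega))
        (fun a ha b hb => hinj a (by omega) b (by omega))
      have hfold : (List.range (M + 1)).foldl (fun r t => r.set (p t) (v t)) r
          = ((List.range M).foldl (fun r t => r.set (p t) (v t)) r).set (p M) (v M) := by
        rw [List.range_succ, List.foldl_append]; rfl
      have hpM : p M < ((List.range M).foldl (fun r t => r.set (p t) (v t)) r).length := by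
        rw [ihl]; exact hp M (by omega)
      refine ⟨?_, ?_, ?_⟩
      · rw [hfold, List.length_set, ihl]
      · intro t ht
        rw [hfold, pvGetDSet hpM]
        rcases Nat.lt_or_ge t M with htM | htM
        · rw [if_neg, ihhit t htM]
          intro h
          have := hinj t (by omega) M (by omega) h
          omega
        · have : t = M := by omega
          subst this
          rw [if_pos rfl]
      · intro j hj
        rw [hfold, pvGetDSet hpM]
        rw [if_neg (fun h : j = p M => hj M (by omega) h.symm)]
        exact ihmiss j (fun t ht => hj t (by omega))

-- the orbit list written by A's while loop, as Ints
def pvOrbL (f : ℕ → ℕ) (s L : ℕ) : List Int := (List.range L).map (fun t => ((f^[t] s : ℕ) : Int))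

lemma pvWalkLemma {n : ℕ} {A : List Int} (hg : pvGood n A)
    (V : List Bool)
    {s : ℕ} (hs : s < n)
    (hcl : ∀ j < n, V.getD j false = true → V.getD (pvF A j) false = true)
    (hsv : V.getD s false = false) :
    ∀ (fuel t : ℕ), t ≤ pvPd (pvF A) s → pvPd (pvF A) s - t < fuel →
    ∀ (V' : List Bool) (cyc : List Int),
    V'.length = n →
    (∀ j : ℕ, V'.getD j false = true ↔ (V.getD j false = true ∨ ∃ u < t, (pvF A)^[u] s = j)) →
    ∃ W, pvCsWalk A V' cyc (((pvF A)^[t] s : ℕ) : Int) fuel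
          = (W, cyc ++ (List.range (pvPd (pvF A) s - t)).map (fun u => (((pvF A)^[t+u] s : ℕ) : Int)))
        ∧ W.length = n
        ∧ (∀ j : ℕ, W.getD j false = true ↔ (V.getD j false = true ∨ ∃ u < pvPd (pvF A) s, (pvF A)^[u] s = j)) := by
  obtain ⟨hgm, hgi⟩ := hg
  have hm : ∀ x < n, pvF A x < n := fun x hx => (hgm x hx).1
  obtain ⟨hpd0, hfix, -⟩ := pvPdSpec hm hgi hs
  -- closure propagates along iterates
  have hVprop : ∀ (k j : ℕ), j < n → V.getD j false = true → V.getD ((pvF A)^[k] j) false = true := by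
    intro k
    induction k with
    | zero => intro j _ h; simpa using h
    | succ k ih =>
        intro j hj h
        rw [Function.iterate_succ_apply']
        exact hcl _ (pvIterLt hm hj k) (ih j hj h)
  intro fuel
  induction fuel with
  | zero => intro t ht hlt; omega
  | succ fuel ih =>
      intro t ht hlt V' cyc hV'l hV'char
      have hcur : (pvF A)^[t] s < n := pvIterLt hm hs t
      have hcur' : (pvF A)^[t] s < V'.length := by omega
      have hget : PySem.List.pyGet? V' ((((pvF A)^[t] s : ℕ)) : Int)
          = some (V'.getD ((pvF A)^[t] s) false) := by
        rw [PySem.List.pyGet?_natCast, List.getElem?_eq_getElem hcur',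
          List.getD_eq_getElem _ _ hcur']
      by_cases hb : V'.getD ((pvF A)^[t] s) false = true
      · -- stop: already visited, so t = pvPd s and the cycle is complete
        have htpd : t = pvPd (pvF A) s := by
          rcases (hV'char _).mp hb with hVt | ⟨u, hu, hfu⟩
          · exfalso
            have := hVprop (pvPd (pvF A) s - t) _ hcur hVt
            rw [← Function.iterate_add_apply,
              show pvPd (pvF A) s - t + t = pvPd (pvF A) s by omega, hfix] at this
            rw [this] at hsv; exact absurd hsv (by simp)
          · rcases Nat.lt_or_ge t (pvPd (pvF A) s) with hlt' | _
            · exact absurd (pvIterInjLt hm hgi hs (by omega) hlt' hfu) (by omega)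
            · omega
        subst htpd
        refine ⟨V', ?_, hV'l, fun j => hV'char j⟩
        rw [pvCsWalk, hget]
        rw [List.getD_eq_getElem?_getD] at hb
        simp [hb]
      · -- step: mark current, append it, move on
        have hbf : V'.getD ((pvF A)^[t] s) false = false := by
          cases h : V'.getD ((pvF A)^[t] s) false
          · rfl
          · exact absurd h hb
        have htlt : t < pvPd (pvF A) s := by
          rcases Nat.lt_or_ge t (pvPd (pvF A) s) with h | h
          · exact h
          · exfalso
            have ht' : t = pvPd (pvF A) s := by omega
            apply hb
            apply (hV'char _).mpr
            right
            exact ⟨0, by omega, by subst ht'; simpa using hfix.symm⟩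
        have hnext : PySem.List.pyGetD A (((pvF A)^[t] s : ℕ) : Int) 0 - 1
            = (((pvF A)^[t+1] s : ℕ) : Int) := by
          rw [(hgm _ hcur).2]
          rw [show t + 1 = 1 + t by omega, Function.iterate_add_apply]
          simp
        have hsetl : (V'.set ((pvF A)^[t] s) true).length = n := by
          rw [List.length_set]; exact hV'l
        have hchar' : ∀ j : ℕ, (V'.set ((pvF A)^[t] s) true).getD j false = true ↔
            (V.getD j false = true ∨ ∃ u < t + 1, (pvF A)^[u] s = j) := by
          intro j
          rw [pvGetDSetG hcur' true false j]
          by_cases hj : j = (pvF A)^[t] s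
          · subst hj
            simp only [if_pos rfl]
            constructor
            · intro _; exact Or.inr ⟨t, by omega, rfl⟩
            · intro _; rfl
          · rw [if_neg hj, hV'char j]
            constructor
            · rintro (h | ⟨u, hu, hfu⟩)
              · exact Or.inl h
              · exact Or.inr ⟨u, by omega, hfu⟩
            · rintro (h | ⟨u, hu, hfu⟩)
              · exact Or.inl h
              · rcases Nat.lt_or_ge u t with h' | h'
                · exact Or.inr ⟨u, h', hfu⟩
                · exfalso
                  have : u = t := by omega
                  subst this
                  exact hj hfu.symm
        obtain ⟨W, hW1, hW2, hW3⟩ := ih (t + 1) (by omega) (by omega)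
          (V'.set ((pvF A)^[t] s) true) (cyc ++ [(((pvF A)^[t] s : ℕ) : Int)]) hsetl hchar'
        refine ⟨W, ?_, hW2, hW3⟩
        rw [pvCsWalk, hget]
        simp only [hbf, Bool.false_eq_true, if_false, PySem.List.pySetD_natCast,
          Int.toNat_natCast, hnext]
        rw [hW1]
        rw [show pvPd (pvF A) s - t = (pvPd (pvF A) s - (t + 1)) + 1 by omega]
        rw [List.range_succ_eq_map, List.map_cons, List.map_map]
        simp only [Nat.add_zero, List.append_assoc, List.cons_append, List.nil_append]
        have hmapeq : List.map (fun u => (((pvF A)^[t+1+u] s : ℕ) : Int))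
              (List.range (pvPd (pvF A) s - (t+1)))
            = List.map ((fun u => (((pvF A)^[t+u] s : ℕ) : Int)) ∘ Nat.succ)
              (List.range (pvPd (pvF A) s - (t+1))) := by
          apply List.map_congr_left
          intro u _
          simp only [Function.comp_apply]
          have he : t + 1 + u = t + (u + 1) := by omega
          rw [he]
        rw [hmapeq]

lemma pvCyclesAux {n : ℕ} {A : List Int} (hg : pvGood n A) :
    ∀ m, m ≤ n →
    ∃ V cycles, (List.range m).foldl
        (fun st k => if PySem.List.pyGetD st.1 ((k : ℕ) : Int) false then st
          else ((pvCsWalk A st.1 [] ((k : ℕ) : Int) (st.1.length + 1)).1,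
            st.2 ++ [(pvCsWalk A st.1 [] ((k : ℕ) : Int) (st.1.length + 1)).2]))
        (List.replicate n false, ([] : List (List Int))) = (V, cycles) ∧
      V.length = n ∧
      (∀ j : ℕ, V.getD j false = true ↔ ∃ i < m, ∃ u, (pvF A)^[u] i = j) ∧
      (∀ c ∈ cycles, ∃ s < n, c = pvOrbL (pvF A) s (pvPd (pvF A) s)) ∧
      (∀ j : ℕ, V.getD j false = true → ∃ c ∈ cycles, ((j : ℕ) : Int) ∈ c) := by
  obtain ⟨hgm, hgi⟩ := hg
  have hm : ∀ x < n, pvF A x < n := fun x hx => (hgm x hx).1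
  intro m
  induction m with
  | zero =>
      intro _
      refine ⟨List.replicate n false, [], by simp, by simp, ?_, by simp, ?_⟩
      · intro j
        rw [List.getD_eq_getElem?_getD, List.getElem?_replicate]
        by_cases h : j < n <;> simp [h]
      · intro j hj
        rw [List.getD_eq_getElem?_getD, List.getElem?_replicate] at hj
        split at hj <;> simp_all
  | succ m ihm =>
      intro hmn
      obtain ⟨V, cycles, heq, hVl, hVchar, hshape, hcov⟩ := ihm (by omega)
      have hsm : m < n := by omega
      rw [List.range_succ, List.foldl_append, heq]
      simp only [List.foldl_cons, List.foldl_nil]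
      by_cases hvm : V.getD m false = true
      · -- already visited: state unchanged
        have hget : PySem.List.pyGetD V ((m : ℕ) : Int) false = true := by
          rw [PySem.List.pyGetD_natCast]; exact hvm
        rw [if_pos hget]
        refine ⟨V, cycles, rfl, hVl, ?_, hshape, hcov⟩
        intro j
        rw [hVchar j]
        constructor
        · rintro ⟨i, hi, u, hu⟩
          exact ⟨i, by omega, u, hu⟩
        · rintro ⟨i, hi, u, hu⟩
          rcases Nat.lt_or_ge i m with h' | h'
          · exact ⟨i, h', u, hu⟩
          · have him : i = m := by omega
            subst him
            obtain ⟨i0, hi0, u0, hu0⟩ := (hVchar i).mp hvm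
            refine ⟨i0, hi0, u + u0, ?_⟩
            rw [Function.iterate_add_apply, hu0]
            exact hu
      · -- new cycle: run the walk from m
        have hget : PySem.List.pyGetD V ((m : ℕ) : Int) false = false := by
          rw [PySem.List.pyGetD_natCast]
          cases h : V.getD m false
          · rfl
          · exact absurd h hvm
        have hsv : V.getD m false = false := by
          cases h : V.getD m false
          · rfl
          · exact absurd h hvm
        rw [if_neg (by rw [hget]; simp)]
        have hcl : ∀ j < n, V.getD j false = true → V.getD (pvF A j) false = true := by
          intro j hj hjt
          obtain ⟨i, hi, u, hu⟩ := (hVchar j).mp hjt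
          apply (hVchar _).mpr
          refine ⟨i, hi, u + 1, ?_⟩
          rw [Function.iterate_succ_apply', hu]
        obtain ⟨hpd0, -, hpdn⟩ := pvPdSpec hm hgi hsm
        obtain ⟨W, hW1, hW2, hW3⟩ := pvWalkLemma ⟨hgm, hgi⟩ V hsm hcl hsv
          (n + 1) 0 (by omega) (by omega) V [] hVl
          (fun j => by
            constructor
            · intro h; exact Or.inl h
            · rintro (h | ⟨u, hu, -⟩)
              · exact h
              · omega)
        have hW1' : pvCsWalk A V [] ((m : ℕ) : Int) (V.length + 1)
            = (W, pvOrbL (pvF A) m (pvPd (pvF A) m)) := by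
          rw [hVl]
          simpa [pvOrbL] using hW1
        rw [hW1']
        refine ⟨W, cycles ++ [pvOrbL (pvF A) m (pvPd (pvF A) m)], rfl, hW2, ?_, ?_, ?_⟩
        · intro j
          rw [hW3 j]
          constructor
          · rintro (h | ⟨u, hu, hfu⟩)
            · obtain ⟨i, hi, u, hu⟩ := (hVchar j).mp h
              exact ⟨i, by omega, u, hu⟩
            · exact ⟨m, by omega, u, hfu⟩
          · rintro ⟨i, hi, u, hu⟩
            rcases Nat.lt_or_ge i m with h' | h'
            · exact Or.inl ((hVchar j).mpr ⟨i, h', u, hu⟩)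
            · have him : i = m := by omega
              subst him
              right
              refine ⟨u % pvPd (pvF A) i, Nat.mod_lt _ hpd0, ?_⟩
              rw [← pvIterMod hm hgi hsm u]
              exact hu
        · intro c hc
          rcases List.mem_append.mp hc with h | h
          · exact hshape c h
          · simp only [List.mem_singleton] at h
            subst h
            exact ⟨m, hsm, rfl⟩
        · intro j hjt
          rcases (hW3 j).mp hjt with h | ⟨u, hu, hfu⟩
          · obtain ⟨c, hc, hjc⟩ := hcov j h
            exact ⟨c, List.mem_append.mpr (Or.inl hc), hjc⟩
          · refine ⟨pvOrbL (pvF A) m (pvPd (pvF A) m), by simp, ?_⟩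
            unfold pvOrbL
            apply List.mem_map.mpr
            exact ⟨u, by simp [hu], by simp [hfu]⟩

lemma pvCyclesLemma {n : ℕ} {A : List Int} (hg : pvGood n A) :
    ∃ V cycles, pvCsCycles (n : Int) A = (V, cycles) ∧
      (∀ c ∈ cycles, ∃ s < n, c = pvOrbL (pvF A) s (pvPd (pvF A) s)) ∧
      (∀ j < n, ∃ c ∈ cycles, ((j : ℕ) : Int) ∈ c) := by
  obtain ⟨V, cycles, heq, hVl, hVchar, hshape, hcov⟩ := pvCyclesAux hg n le_rfl
  refine ⟨V, cycles, ?_, hshape, ?_⟩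
  · unfold pvCsCycles
    rw [PySem.List.pyRange_one]
    simp only [Int.sub_zero, Int.toNat_natCast]
    rw [List.foldl_map]
    simp only [zero_add]
    exact heq
  · intro j hj
    exact hcov j ((hVchar j).mpr ⟨j, hj, 0, rfl⟩)

lemma pvOrbGet {A : List Int} {s L : ℕ} (u : ℕ) (hu : u < L) :
    (pvOrbL (pvF A) s L).getD u 0 = (((pvF A)^[u] s : ℕ) : Int) := by
  unfold pvOrbL
  rw [List.getD_eq_getElem _ _ (by simp [hu])]
  simp

lemma pvCardsGet {n : ℕ} (x : ℕ) (hx : x < n) :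
    PySem.List.pyGetD (PySem.List.pyRange 1 ((n : Int) + 1) 1) ((x : ℕ) : Int) 0
      = 1 + ((x : ℕ) : Int) := by
  rw [PySem.List.pyRange_one]
  rw [PySem.List.pyGetD_natCast]
  have hlen : ((n : Int) + 1 - 1).toNat = n := by omega
  rw [hlen]
  rw [List.getD_eq_getElem _ _ (by simp [hx])]
  simp

lemma pvCycleStep {n : ℕ} {A : List Int} (hg : pvGood n A) (K : Int)
    {s : ℕ} (hs : s < n) (res : List Int) (hl : res.length = n) :
    ((PySem.List.pyRange 0 ((pvOrbL (pvF A) s (pvPd (pvF A) s)).length : Int) 1).foldl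
      (fun result i =>
        PySem.List.pySetD result
          (PySem.List.pyGetD (pvOrbL (pvF A) s (pvPd (pvF A) s))
            (PySem.Int.mod (i + PySem.Int.mod K ((pvOrbL (pvF A) s (pvPd (pvF A) s)).length : Int))
              ((pvOrbL (pvF A) s (pvPd (pvF A) s)).length : Int)) 0)
          (PySem.List.pyGetD (PySem.List.pyRange 1 ((n : Int) + 1) 1)
            (PySem.List.pyGetD (pvOrbL (pvF A) s (pvPd (pvF A) s)) i 0) 0))
      res).length = n ∧
    ∀ j < n, ((PySem.List.pyRange 0 ((pvOrbL (pvF A) s (pvPd (pvF A) s)).length : Int) 1).foldl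
      (fun result i =>
        PySem.List.pySetD result
          (PySem.List.pyGetD (pvOrbL (pvF A) s (pvPd (pvF A) s))
            (PySem.Int.mod (i + PySem.Int.mod K ((pvOrbL (pvF A) s (pvPd (pvF A) s)).length : Int))
              ((pvOrbL (pvF A) s (pvPd (pvF A) s)).length : Int)) 0)
          (PySem.List.pyGetD (PySem.List.pyRange 1 ((n : Int) + 1) 1)
            (PySem.List.pyGetD (pvOrbL (pvF A) s (pvPd (pvF A) s)) i 0) 0))
      res).getD j 0 =
      if ((j : ℕ) : Int) ∈ pvOrbL (pvF A) s (pvPd (pvF A) s) then ((pvG (pvF A) K j : ℕ) : Int) + 1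
      else res.getD j 0 := by
  obtain ⟨hgm, hgi⟩ := hg
  have hm : ∀ x < n, pvF A x < n := fun x hx => (hgm x hx).1
  obtain ⟨hpd0, hfix, hpdn⟩ := pvPdSpec hm hgi hs
  set L := pvPd (pvF A) s with hLdef
  have hL0 : (0 : Int) < (L : Int) := by exact_mod_cast hpd0
  have hclen : (pvOrbL (pvF A) s L).length = L := by simp [pvOrbL]
  set S : ℕ := (K % (L : Int)).toNat with hSdef
  have hS : (S : Int) = K % (L : Int) := Int.toNat_of_nonneg (Int.emod_nonneg _ (by omega))
  have hSlt : S < L := by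
    have := Int.emod_lt_of_pos K hL0
    omega
  set M : ℕ := ((-K) % (L : Int)).toNat with hMdef
  have hM : (M : Int) = (-K) % (L : Int) := Int.toNat_of_nonneg (Int.emod_nonneg _ (by omega))
  have hMlt : M < L := by
    have := Int.emod_lt_of_pos (-K) hL0
    omega
  have hSM : S + M = 0 ∨ S + M = L := by
    have hdvd : (L : Int) ∣ ((S : Int) + (M : Int)) := by
      rw [hS, hM, Int.emod_def, Int.emod_def]
      exact ⟨-(K / (L : Int)) - ((-K) / (L : Int)), by ring⟩
    have hdvd' : L ∣ S + M := by exact_mod_cast hdvd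
    obtain ⟨k, hk⟩ := hdvd'
    match k, hk with
    | 0, hk => omega
    | 1, hk => omega
    | (k + 2), hk =>
        exfalso
        have : L * (k + 2) = L * k + L + L := by ring
        omega
  -- rewrite the fold into a plain scatter over List.range L
  have hbody : ((PySem.List.pyRange 0 ((pvOrbL (pvF A) s L).length : Int) 1).foldl
      (fun result i =>
        PySem.List.pySetD result
          (PySem.List.pyGetD (pvOrbL (pvF A) s L)
            (PySem.Int.mod (i + PySem.Int.mod K ((pvOrbL (pvF A) s L).length : Int))
              ((pvOrbL (pvF A) s L).length : Int)) 0)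
          (PySem.List.pyGetD (PySem.List.pyRange 1 ((n : Int) + 1) 1)
            (PySem.List.pyGetD (pvOrbL (pvF A) s L) i 0) 0))
      res)
      = (List.range L).foldl
          (fun r t => r.set ((pvF A)^[(t + S) % L] s) (1 + (((pvF A)^[t] s : ℕ) : Int))) res := by
    rw [hclen]
    rw [PySem.List.pyRange_one 0 ((L : ℕ) : Int)]
    simp only [Int.sub_zero, Int.toNat_natCast]
    rw [List.foldl_map]
    apply PySem.List.foldl_congr_mem
    intro r t ht
    have htL : t < L := List.mem_range.mp ht
    rw [zero_add]
    simp only [PySem.Int.mod_eq_emod_of_pos hL0]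
    have hidx : ((t : Int) + K % (L : Int)) % (L : Int) = (((t + S) % L : ℕ) : Int) := by
      rw [← hS, Int.natCast_mod]
      push_cast
      ring_nf
    rw [hidx, PySem.List.pyGetD_natCast, pvOrbGet _ (Nat.mod_lt _ hpd0),
      PySem.List.pyGetD_natCast, pvOrbGet t htL,
      pvCardsGet _ (pvIterLt hm hs t), PySem.List.pySetD_natCast]
  rw [hbody]
  obtain ⟨hsl, hshit, hsmiss⟩ := pvScatter (fun t => (pvF A)^[(t + S) % L] s)
    (fun t => 1 + (((pvF A)^[t] s : ℕ) : Int)) L res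
    (fun t _ => by rw [hl]; exact pvIterLt hm hs _)
    (fun a ha b hb h => by
      have h2 := pvIterInjLt hm hgi hs (Nat.mod_lt _ hpd0) (Nat.mod_lt _ hpd0) h
      have h3 : a % L = b % L := Nat.ModEq.add_right_cancel' S h2
      rw [Nat.mod_eq_of_lt ha, Nat.mod_eq_of_lt hb] at h3
      exact h3)
  refine ⟨by rw [hsl, hl], ?_⟩
  intro j hj
  by_cases hmem : ((j : ℕ) : Int) ∈ pvOrbL (pvF A) s L
  · rw [if_pos hmem]
    obtain ⟨u, hu, hju⟩ := List.mem_map.mp hmem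
    have huL : u < L := List.mem_range.mp hu
    have hju' : (pvF A)^[u] s = j := by exact_mod_cast hju
    have htlt : (u + (L - S)) % L < L := Nat.mod_lt _ hpd0
    have hpt : (((u + (L - S)) % L) + S) % L = u := by
      rw [Nat.mod_add_mod]
      rw [show u + (L - S) + S = u + L by omega]
      rw [Nat.add_mod_right]
      exact Nat.mod_eq_of_lt huL
    have hhit := hshit ((u + (L - S)) % L) htlt
    simp only [hpt, hju'] at hhit
    rw [hhit]
    have hGval : pvG (pvF A) K j = (pvF A)^[(u + (L - S)) % L] s := by
      unfold pvG
      subst hju'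
      rw [pvPdIter hm hgi hs u, ← hLdef, ← hMdef]
      rw [← Function.iterate_add_apply]
      conv_lhs => rw [pvIterMod hm hgi hs (M + u)]
      congr 1
      rcases hSM with h0 | h0
      · have hS0 : S = 0 := by omega
        have hM0 : M = 0 := by omega
        rw [hS0, hM0, Nat.sub_zero, Nat.zero_add, Nat.add_mod_right]
      · have hMS : L - S = M := by omega
        rw [hMS, Nat.add_comm M u]
    rw [hGval]
    omega
  · rw [if_neg hmem]
    apply hsmiss
    intro t htL hpt
    apply hmem
    rw [← hpt]
    apply List.mem_map.mpr
    exact ⟨(t + S) % L, List.mem_range.mpr (Nat.mod_lt _ hpd0), rfl⟩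

lemma pvAChar {n : ℕ} {K : Int} {A : List Int} (hg : pvGood n A) :
    (card_shuffle (n : Int) K A).length = n ∧
    ∀ j < n, (card_shuffle (n : Int) K A).getD j 0 = ((pvG (pvF A) K j : ℕ) : Int) + 1 := by
  obtain ⟨V, cycles, hcyc, hshape, hcov⟩ := pvCyclesLemma hg
  have main : ∀ (cys : List (List Int)),
      (∀ c ∈ cys, ∃ s < n, c = pvOrbL (pvF A) s (pvPd (pvF A) s)) →
      ∀ res : List Int, res.length = n →
      (cys.foldl (fun result cycle =>
        (PySem.List.pyRange 0 ((cycle.length : ℕ) : Int) 1).foldl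
          (fun result i =>
            PySem.List.pySetD result
              (PySem.List.pyGetD cycle
                (PySem.Int.mod (i + PySem.Int.mod K ((cycle.length : ℕ) : Int))
                  ((cycle.length : ℕ) : Int)) 0)
              (PySem.List.pyGetD (PySem.List.pyRange 1 ((n : Int) + 1) 1)
                (PySem.List.pyGetD cycle i 0) 0))
          result) res).length = n ∧
      ∀ j < n, (cys.foldl (fun result cycle =>
        (PySem.List.pyRange 0 ((cycle.length : ℕ) : Int) 1).foldl
          (fun result i =>
            PySem.List.pySetD result
              (PySem.List.pyGetD cycle
                (PySem.Int.mod (i + PySem.Int.mod K ((cycle.length : ℕ) : Int))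
                  ((cycle.length : ℕ) : Int)) 0)
              (PySem.List.pyGetD (PySem.List.pyRange 1 ((n : Int) + 1) 1)
                (PySem.List.pyGetD cycle i 0) 0))
          result) res).getD j 0 =
        if ∃ c ∈ cys, ((j : ℕ) : Int) ∈ c then ((pvG (pvF A) K j : ℕ) : Int) + 1
        else res.getD j 0 := by
    intro cys
    induction cys with
    | nil =>
        intro _ res hres
        refine ⟨hres, ?_⟩
        intro j hj
        simp
    | cons c rest ih =>
        intro hsh res hres
        obtain ⟨s, hsn, hcs⟩ := hsh c (by simp)
        subst hcs
        rw [List.foldl_cons]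
        obtain ⟨h1l, h1v⟩ := pvCycleStep ⟨hg.1, hg.2⟩ K hsn res hres
        obtain ⟨h2l, h2v⟩ := ih (fun c hc => hsh c (by simp [hc])) _ h1l
        refine ⟨h2l, ?_⟩
        intro j hj
        rw [h2v j hj, h1v j hj]
        by_cases hr : ∃ c ∈ rest, ((j : ℕ) : Int) ∈ c
        · rw [if_pos hr, if_pos (by obtain ⟨c, hc, hjc⟩ := hr; exact ⟨c, by simp [hc], hjc⟩)]
        · rw [if_neg hr]
          by_cases hc : ((j : ℕ) : Int) ∈ pvOrbL (pvF A) s (pvPd (pvF A) s)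
          · rw [if_pos hc, if_pos ⟨_, by simp, hc⟩]
          · rw [if_neg hc, if_neg (by
              rintro ⟨c', hc', hjc⟩
              rcases List.mem_cons.mp hc' with h | h
              · exact hc (h ▸ hjc)
              · exact hr ⟨c', h, hjc⟩)]
  have hcard : card_shuffle (n : Int) K A = cycles.foldl (fun result cycle =>
        (PySem.List.pyRange 0 ((cycle.length : ℕ) : Int) 1).foldl
          (fun result i =>
            PySem.List.pySetD result
              (PySem.List.pyGetD cycle
                (PySem.Int.mod (i + PySem.Int.mod K ((cycle.length : ℕ) : Int))
                  ((cycle.length : ℕ) : Int)) 0)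
              (PySem.List.pyGetD (PySem.List.pyRange 1 ((n : Int) + 1) 1)
                (PySem.List.pyGetD cycle i 0) 0))
          result) (List.replicate n 0) := by
    simp only [card_shuffle, hcyc, Int.toNat_natCast]
  obtain ⟨hfl, hfv⟩ := main cycles hshape (List.replicate n 0) (by simp)
  refine ⟨by rw [hcard]; exact hfl, ?_⟩
  intro j hj
  rw [hcard, hfv j hj, if_pos (hcov j hj)]

-- B side: p represents the function φ on [0,n)
def pvRep (n : ℕ) (p : List Int) (φ : ℕ → ℕ) : Prop :=
  p.length = n ∧ ∀ i < n, φ i < n ∧ p.getD i 0 = ((φ i : ℕ) : Int)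

lemma pvRepCongr {n : ℕ} {p : List Int} {φ ψ : ℕ → ℕ} (h : pvRep n p φ)
    (he : ∀ i, φ i = ψ i) : pvRep n p ψ :=
  ⟨h.1, fun i hi => by rw [← he i]; exact h.2 i hi⟩

lemma pvRepId (n : ℕ) : pvRep n (PySem.List.pyRange 0 (n : Int) 1) id := by
  constructor
  · simp [PySem.List.pyRange_one]
  · intro i hi
    refine ⟨hi, ?_⟩
    simp [PySem.List.pyRange_one, List.getD_eq_getElem?_getD, List.getElem?_range, hi]

lemma pvRepComp {n : ℕ} {a b : List Int} {φ ψ : ℕ → ℕ}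
    (ha : pvRep n a φ) (hb : pvRep n b ψ) :
    pvRep n ((PySem.List.pyRange 0 (n : Int) 1).map
      (fun i => PySem.List.pyGetD b (PySem.List.pyGetD a i 0) 0)) (fun i => ψ (φ i)) := by
  obtain ⟨hal, hav⟩ := ha
  obtain ⟨hbl, hbv⟩ := hb
  constructor
  · simp [PySem.List.pyRange_one]
  · intro i hi
    refine ⟨(hbv _ (hav i hi).1).1, ?_⟩
    have h1 : ((PySem.List.pyRange 0 (n : Int) 1).map
        (fun i => PySem.List.pyGetD b (PySem.List.pyGetD a i 0) 0)).getD i 0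
        = PySem.List.pyGetD b (PySem.List.pyGetD a (i : Int) 0) 0 := by
      simp [PySem.List.pyRange_one, List.getD_eq_getElem?_getD, List.getElem?_range, hi]
    rw [h1, PySem.List.pyGetD_natCast, (hav i hi).2, PySem.List.pyGetD_natCast,
      (hbv _ (hav i hi).1).2]

lemma pvRepPow {n : ℕ} (e : ℕ) : ∀ {acc base : List Int} {φa φb : ℕ → ℕ},
    pvRep n acc φa → pvRep n base φb →
    pvRep n (pvCsPow (n : Int) acc base e) (fun i => φb^[e] (φa i)) := by
  induction e using Nat.strong_induction_on with
  | _ e IH =>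
    intro acc base φa φb ha hb
    by_cases he : e = 0
    · subst he
      rw [pvCsPow]
      simpa using ha
    · rw [pvCsPow, if_neg he]
      have ha' : pvRep n (if e % 2 = 1 then
          (PySem.List.pyRange 0 (n : Int) 1).map
            (fun i => PySem.List.pyGetD base (PySem.List.pyGetD acc i 0) 0)
          else acc) (fun i => φb^[e % 2] (φa i)) := by
        by_cases hodd : e % 2 = 1
        · rw [if_pos hodd, hodd]
          exact pvRepCongr (pvRepComp ha hb) (fun i => by simp)
        · have h0 : e % 2 = 0 := by omega
          rw [if_neg hodd, h0]
          exact pvRepCongr ha (fun i => by simp)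
      have hb' : pvRep n ((PySem.List.pyRange 0 (n : Int) 1).map
          (fun i => PySem.List.pyGetD base (PySem.List.pyGetD base i 0) 0))
          (fun i => φb^[2] i) := by
        exact pvRepCongr (pvRepComp hb hb) (fun i => by
          simp [Function.iterate_succ_apply', Function.iterate_one])
      have := IH (e / 2) (Nat.div_lt_self (Nat.pos_of_ne_zero he) (by omega)) ha' hb'
      apply pvRepCongr this
      intro i
      show (fun i => φb^[2] i)^[e / 2] (φb^[e % 2] (φa i)) = φb^[e] (φa i)
      have : (fun i => φb^[2] i) = φb^[2] := rfl
      rw [this, ← Function.iterate_mul, ← Function.iterate_add_apply]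
      congr 1
      omega

lemma pvBGather {n : ℕ} (accL : List Int) (φ : ℕ → ℕ) (hrep : pvRep n accL φ) :
    (accL.map (fun x => x + 1)).length = n ∧
    ∀ j < n, (accL.map (fun x => x + 1)).getD j 0 = ((φ j : ℕ) : Int) + 1 := by
  obtain ⟨hl, hv⟩ := hrep
  refine ⟨by simp [hl], ?_⟩
  intro j hj
  have hjl : j < accL.length := by omega
  rw [List.getD_eq_getElem _ _ (by simpa using hjl), List.getElem_map]
  have := (hv j hj).2
  rw [List.getD_eq_getElem _ _ hjl] at this
  rw [this]

lemma pvBScatter {n : ℕ} (accL : List Int) (φ : ℕ → ℕ) (hrep : pvRep n accL φ)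
    (hinj : ∀ a < n, ∀ b < n, φ a = φ b → a = b) :
    ((PySem.List.pyRange 0 (n : Int) 1).foldl
      (fun result i => PySem.List.pySetD result (PySem.List.pyGetD accL i 0) (i + 1))
      (List.replicate n 0)).length = n ∧
    ∀ j < n, ∀ t < n, φ t = j →
      ((PySem.List.pyRange 0 (n : Int) 1).foldl
        (fun result i => PySem.List.pySetD result (PySem.List.pyGetD accL i 0) (i + 1))
        (List.replicate n 0)).getD j 0 = (t : Int) + 1 := by
  obtain ⟨hl, hv⟩ := hrep
  have hbody : (PySem.List.pyRange 0 (n : Int) 1).foldl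
      (fun result i => PySem.List.pySetD result (PySem.List.pyGetD accL i 0) (i + 1))
      (List.replicate n 0)
      = (List.range n).foldl (fun r t => r.set (φ t) ((t : Int) + 1)) (List.replicate n 0) := by
    rw [PySem.List.pyRange_one, List.foldl_map]
    simp only [Int.sub_zero, Int.toNat_natCast]
    apply PySem.List.foldl_congr_mem
    intro acc t ht
    have htn : t < n := List.mem_range.mp ht
    rw [zero_add, PySem.List.pyGetD_natCast, (hv t htn).2, PySem.List.pySetD_natCast]
  obtain ⟨hsl, hshit, -⟩ := pvScatter (fun t => φ t) (fun t => (t : Int) + 1) n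
    (List.replicate n 0)
    (fun t ht => by simpa using (hv t ht).1)
    (fun a ha b hb h => hinj a ha b hb h)
  constructor
  · rw [hbody, hsl]; simp
  · intro j hj t ht hφ
    rw [hbody]
    have := hshit t ht
    rw [hφ] at this
    exact this

lemma pvBChar {n : ℕ} {K : Int} {A : List Int} (hg : pvGood n A) :
    (card_shuffle_alt (n : Int) K A).length = n ∧
    ∀ j < n, (card_shuffle_alt (n : Int) K A).getD j 0 = ((pvG (pvF A) K j : ℕ) : Int) + 1 := by
  obtain ⟨hgm, hgi⟩ := hg
  have hm : ∀ x < n, pvF A x < n := fun x hx => (hgm x hx).1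
  have hrepf : pvRep n ((PySem.List.pyRange 0 (n : Int) 1).map
      (fun i => PySem.List.pyGetD A i 0 - 1)) (pvF A) := by
    constructor
    · simp [PySem.List.pyRange_one]
    · intro i hi
      refine ⟨hm i hi, ?_⟩
      have h1 : ((PySem.List.pyRange 0 (n : Int) 1).map
          (fun i => PySem.List.pyGetD A i 0 - 1)).getD i 0
          = PySem.List.pyGetD A (i : Int) 0 - 1 := by
        simp [PySem.List.pyRange_one, List.getD_eq_getElem?_getD, List.getElem?_range, hi]
      rw [h1, (hgm i hi).2]
      ring
  have hrepacc : ∀ e : ℕ, pvRep n (pvCsPow (n : Int) (PySem.List.pyRange 0 (n : Int) 1)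
      ((PySem.List.pyRange 0 (n : Int) 1).map (fun i => PySem.List.pyGetD A i 0 - 1)) e)
      (fun i => (pvF A)^[e] i) :=
    fun e => pvRepCongr (pvRepPow e (pvRepId n) hrepf) (fun i => rfl)
  have hGfact : ∀ j < n, 0 < pvPd (pvF A) j ∧
      (((((-K) % (pvPd (pvF A) j : Int)).toNat : ℕ) : Int) = (-K) % (pvPd (pvF A) j : Int)) := by
    intro j hj
    have hp := (pvPdSpec hm hgi hj).1
    have hp' : (0 : Int) < (pvPd (pvF A) j : Int) := by exact_mod_cast hp
    exact ⟨hp, Int.toNat_of_nonneg (Int.emod_nonneg _ (by omega))⟩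
  by_cases hK : 0 ≤ K
  · have hsimp : card_shuffle_alt (n : Int) K A =
        (PySem.List.pyRange 0 (n : Int) 1).foldl
          (fun result i => PySem.List.pySetD result
            (PySem.List.pyGetD (pvCsPow (n : Int) (PySem.List.pyRange 0 (n : Int) 1)
              ((PySem.List.pyRange 0 (n : Int) 1).map (fun i => PySem.List.pyGetD A i 0 - 1))
              K.toNat) i 0) (i + 1))
          (List.replicate n 0) := by
      simp only [card_shuffle_alt, if_pos hK, Int.toNat_natCast]
    obtain ⟨hl, hhit⟩ := pvBScatter (n := n) _ _ (hrepacc K.toNat)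
      (fun a ha b hb h => pvIterCancel hm hgi ha hb K.toNat h)
    refine ⟨by rw [hsimp]; exact hl, ?_⟩
    intro j hj
    obtain ⟨hp, htn⟩ := hGfact j hj
    have htlt : pvG (pvF A) K j < n := pvIterLt hm hj _
    have hhitj : (pvF A)^[K.toNat] (pvG (pvF A) K j) = j := by
      unfold pvG
      rw [← Function.iterate_add_apply]
      apply (pvPdDvd hm hgi hj _).mpr
      have hd : ((pvPd (pvF A) j : Int)) ∣
          ((K.toNat : Int) + (((-K) % (pvPd (pvF A) j : Int)).toNat : Int)) := by
        rw [htn, Int.toNat_of_nonneg hK, Int.emod_def]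
        exact ⟨-((-K) / (pvPd (pvF A) j : Int)), by ring⟩
      exact_mod_cast hd
    rw [hsimp]
    exact hhit j hj (pvG (pvF A) K j) htlt hhitj
  · have hsimp : card_shuffle_alt (n : Int) K A =
        (pvCsPow (n : Int) (PySem.List.pyRange 0 (n : Int) 1)
          ((PySem.List.pyRange 0 (n : Int) 1).map (fun i => PySem.List.pyGetD A i 0 - 1))
          (-K).toNat).map (fun x => x + 1) := by
      simp only [card_shuffle_alt, if_neg hK, Int.toNat_natCast]
    obtain ⟨hl, hval⟩ := pvBGather (n := n) _ _ (hrepacc (-K).toNat)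
    refine ⟨by rw [hsimp]; exact hl, ?_⟩
    intro j hj
    obtain ⟨hp, htn⟩ := hGfact j hj
    rw [hsimp, hval j hj]
    unfold pvG
    congr 2
    rw [pvIterMod hm hgi hj (-K).toNat]
    have hcast : (((-K).toNat % pvPd (pvF A) j : ℕ) : Int)
        = (((-K) % (pvPd (pvF A) j : Int)).toNat : Int) := by
      rw [htn, Int.natCast_mod, Int.toNat_of_nonneg (by omega)]
    have heq : (-K).toNat % pvPd (pvF A) j = ((-K) % ((pvPd (pvF A) j : ℕ) : Int)).toNat := by
      exact_mod_cast hcast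
    rw [heq]

lemma pvCsPowNil {N : Int} (hN : PySem.List.pyRange 0 N 1 = []) :
    ∀ (e : ℕ) (base : List Int), pvCsPow N [] base e = [] := by
  intro e
  induction e using Nat.strong_induction_on with
  | _ e IH =>
    intro base
    by_cases he : e = 0
    · subst he
      rw [pvCsPow]
      simp
    · rw [pvCsPow, if_neg he, hN]
      simp only [List.map_nil, ite_self]
      exact IH (e / 2) (Nat.div_lt_self (Nat.pos_of_ne_zero he) (by omega)) _

lemma pvNonpos {N K : Int} {A : List Int} (hN : N ≤ 0) :
    card_shuffle N K A = [] ∧ card_shuffle_alt N K A = [] := by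
  have hr : PySem.List.pyRange 0 N 1 = [] := PySem.List.pyRange_one_eq_nil hN
  have ht : N.toNat = 0 := by omega
  constructor
  · simp only [card_shuffle, pvCsCycles, hr, ht, List.foldl_nil, List.replicate_zero]
  · simp only [card_shuffle_alt, hr, ht, List.replicate_zero, List.map_nil]
    by_cases hK : 0 ≤ K
    · rw [if_pos hK]
      simp
    · rw [if_neg hK]
      rw [pvCsPowNil hr]
      simp

-- ===== VERDICT (by name: the statement is the Claim_ definition above) =====
theorem card_shuffle_spec : Claim_equal_card_shuffle := by
  intro N K A _ hpre
  rcases hpre with hN | ⟨hN0, hlen, hnd, hv⟩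
  · show card_shuffle N K A = card_shuffle_alt N K A
    rw [(pvNonpos hN).1, (pvNonpos hN).2]
  · have hN : 0 ≤ N := by omega
    have hpg := pvPreGood hlen hnd hv
    obtain ⟨n, rfl⟩ : ∃ n : ℕ, N = (n : Int) := ⟨N.toNat, (Int.toNat_of_nonneg hN).symm⟩
    have hg : pvGood n A := by simpa using hpg
    obtain ⟨hal, hav⟩ := pvAChar (K := K) hg
    obtain ⟨hbl, hbv⟩ := pvBChar (K := K) hg
    show card_shuffle _ _ _ = card_shuffle_alt _ _ _
    apply List.ext_getElem (by omega)
    intro j hj hj'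
    have hjn : j < n := by omega
    have h1 := hav j hjn
    have h2 := hbv j hjn
    rw [List.getD_eq_getElem _ _ hj] at h1
    rw [List.getD_eq_getElem _ _ hj'] at h2
    rw [h1, h2]
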